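-- pv_equiv track=rewrite | github.com/Jayhawk314/KOMPOSOS-III-ALPHA | hott/homotopy.py | _check_contractibility
-- ===== SOURCE A (Python) =====
-- from typing import Any, List, Dict, Set, Optional, Tuple
--
-- def _check_contractibility(paths: List[List[str]], spine: List[str]) -> Dict[int, bool]:
--     """
--     Check if each path can be contracted to the spine.
--
--     A path is contractible to the spine if:
--     1. Removing non-spine nodes doesn't break connectivity
--     2. Non-spine nodes are "locally equivalent" - meaning they
--        represent variations that don't change the essential structure
--
--     Returns dict mapping path index to contractibility
--     """
--     contractible = {}
--
--     for idx, path in enumerate(paths):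
--         # Get non-spine nodes
--         non_spine = [n for n in path if n not in spine]
--
--         # A path is contractible if:
--         # 1. Non-spine nodes are "bridges" between spine nodes
--         # 2. The spine subsequence is preserved in order
--
--         # Check spine order preservation
--         spine_positions = []
--         for s in spine:
--             if s in path:
--                 spine_positions.append(path.index(s))
--
--         order_preserved = spine_positions == sorted(spine_positions)
--
--         # A path contracts if removing non-spine doesn't disconnect spine
--         contractible[idx] = order_preserved
--
--     return contractible
-- ===== SOURCE B (Python) =====
-- from typing import List, Dict
--
-- # Pre_ excludes spines with duplicate entries, on which A counts a repeated spine
-- # node once per occurrence while B's unique-appearance list counts it once.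
-- def _check_contractibility(paths: List[List[str]], spine: List[str]) -> Dict[int, bool]:
--     contractible = {}
--     spine_set = set(spine)
--     for idx, path in enumerate(paths):
--         # spine nodes in order of their first appearance in the path
--         first_order = []
--         for n in path:
--             if n in spine_set and n not in first_order:
--                 first_order.append(n)
--         # spine nodes present in the path, in spine order
--         expected = [s for s in spine if s in first_order]
--         contractible[idx] = (first_order == expected)
--     return contractible
-- ===== Notes on version B (the rewrite author's own statement) =====
-- stated objective: alternative
-- what changed: Instead of collecting each spine node's path.index position and comparing the position list with its sorted copy, B builds the list of spine nodes in order of first appearance while scanning the path once and compares it with the present spine nodes in spine order.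
-- outside the precondition, e.g. on _check_contractibility([['a']], ['a', 'a']): A returns {0: True}, B returns {0: False}
import Mathlib
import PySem

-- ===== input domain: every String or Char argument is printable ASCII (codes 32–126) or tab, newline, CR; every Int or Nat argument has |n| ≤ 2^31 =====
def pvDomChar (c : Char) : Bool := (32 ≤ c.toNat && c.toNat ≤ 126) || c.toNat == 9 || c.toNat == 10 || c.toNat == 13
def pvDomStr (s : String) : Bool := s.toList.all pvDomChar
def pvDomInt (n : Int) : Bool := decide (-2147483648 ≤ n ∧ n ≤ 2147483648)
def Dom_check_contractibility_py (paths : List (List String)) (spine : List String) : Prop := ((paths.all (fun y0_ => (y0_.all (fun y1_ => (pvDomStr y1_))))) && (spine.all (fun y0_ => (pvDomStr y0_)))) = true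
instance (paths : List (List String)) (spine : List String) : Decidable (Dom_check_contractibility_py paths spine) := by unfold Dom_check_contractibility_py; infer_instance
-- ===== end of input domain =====

-- B replaces A's per-spine-node index lookups and sorted-positions comparison by comparing two name
-- lists: the spine nodes in order of first appearance in the path vs. in spine order (alternative).

-- ===== PORT A =====
def check_contractibility_py (paths : List (List String)) (spine : List String) : List (Int × Bool) :=
  ((PySem.List.enumerate paths).foldl (fun contractible q =>
    let path := q.2
    let spine_positions : List Int := spine.foldl (fun acc s =>
      if path.contains s then acc ++ [(((PySem.List.index? path s).getD 0 : Nat) : Int)] else acc) []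
    let order_preserved : Bool := spine_positions == PySem.List.sorted spine_positions (fun x => x) false
    contractible.insert q.1 order_preserved) PySem.Dict.empty).items

-- ===== PORT B =====
-- spine nodes in order of their first appearance in the path (one pass over the path)
def pvFirstOrder (spineSet : PySem.Set String) (path : List String) : List String :=
  path.foldl (fun fo n => if spineSet.contains n && !(fo.contains n) then fo ++ [n] else fo) []

def check_contractibility_py_alt (paths : List (List String)) (spine : List String) : List (Int × Bool) :=
  let spineSet := PySem.Set.ofList spine
  ((PySem.List.enumerate paths).foldl (fun contractible q =>
    let fo := pvFirstOrder spineSet q.2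
    let expected := spine.filter (fun s => fo.contains s)
    contractible.insert q.1 (fo == expected)) PySem.Dict.empty).items

-- ===== PRECONDITION & SPEC =====
-- Pre_ excludes spines with duplicate entries: A counts a repeated spine node once per occurrence
-- while B's unique first-appearance list counts it once, so the two defensible readings can differ.
def Pre_check_contractibility_py (paths : List (List String)) (spine : List String) : Prop := spine.Nodup
instance (paths : List (List String)) (spine : List String) : Decidable (Pre_check_contractibility_py paths spine) := by unfold Pre_check_contractibility_py; infer_instance

def pvWitness_check_contractibility_py : List (List String) × List String := ([["a", "b"], ["b", "a"], ["a", "c", "b"]], ["a", "b"])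

def Spec_check_contractibility_py (paths : List (List String)) (spine : List String) (out : List (Int × Bool)) : Prop := out = check_contractibility_py_alt paths spine
instance (paths : List (List String)) (spine : List String) (out : List (Int × Bool)) : Decidable (Spec_check_contractibility_py paths spine out) := by unfold Spec_check_contractibility_py; infer_instance

-- ===== CLAIM (what is proved, stated in full; the proofs are below) =====
def Claim_equal_check_contractibility_py : Prop := ∀ (paths : List (List String)) (spine : List String), Dom_check_contractibility_py paths spine → Pre_check_contractibility_py paths spine → Spec_check_contractibility_py paths spine (check_contractibility_py paths spine)

-- ===== LEMMAS AND PROOFS =====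

-- B's first-appearance fold is set-of-list of the spine-filtered path
lemma pvFirstOrder_eq (ss : PySem.Set String) (path : List String) :
    pvFirstOrder ss path = PySem.Set.ofList (path.filter (fun n => ss.contains n)) := by
  rw [pvFirstOrder, PySem.Set.ofList_eq_foldl, List.foldl_filter]
  congr 1
  funext fo n
  simp only [PySem.Set.add]
  by_cases h : n ∈ ss <;> by_cases hc : n ∈ fo <;> simp [h, hc]

lemma mem_pvFirstOrder (spine path : List String) (x : String) :
    x ∈ pvFirstOrder (PySem.Set.ofList spine) path ↔ x ∈ path ∧ x ∈ spine := by
  rw [pvFirstOrder_eq, PySem.Set.mem_ofList, List.mem_filter]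
  constructor
  · rintro ⟨h1, h2⟩
    exact ⟨h1, (PySem.Set.mem_ofList spine x).mp (List.contains_iff_mem.mp h2)⟩
  · rintro ⟨h1, h2⟩
    exact ⟨h1, List.contains_iff_mem.mpr ((PySem.Set.mem_ofList spine x).mpr h2)⟩

-- the Int key A compares: first index of s in path (0 if absent)
def pvKey (path : List String) (s : String) : Int := (((PySem.List.index? path s).getD 0 : Nat) : Int)

lemma pvKey_lt_length (path : List String) (s : String) (h : s ∈ path) :
    pvKey path s < (path.length : Int) := by
  obtain ⟨k, hk⟩ := Option.isSome_iff_exists.mp ((PySem.List.index?_isSome_iff path s).mpr h)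
  obtain ⟨hlt, -, -⟩ := PySem.List.getElem_of_index?_eq_some hk
  simp only [pvKey, hk, Option.getD_some]
  exact_mod_cast hlt

lemma pvKey_inj (path : List String) (a b : String) (ha : a ∈ path) (hb : b ∈ path)
    (hk : pvKey path a = pvKey path b) : a = b := by
  obtain ⟨ka, hka⟩ := Option.isSome_iff_exists.mp ((PySem.List.index?_isSome_iff path a).mpr ha)
  obtain ⟨kb, hkb⟩ := Option.isSome_iff_exists.mp ((PySem.List.index?_isSome_iff path b).mpr hb)
  obtain ⟨hla, hga, -⟩ := PySem.List.getElem_of_index?_eq_some hka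
  obtain ⟨hlb, hgb, -⟩ := PySem.List.getElem_of_index?_eq_some hkb
  simp only [pvKey, hka, hkb, Option.getD_some, Nat.cast_inj] at hk
  subst hk
  rw [← hga, ← hgb]

-- the first-appearance list is strictly increasing in the first-index key
lemma pvFO_pairwise (p : String → Bool) (path : List String) :
    (PySem.Set.ofList (path.filter p)).Pairwise (fun a b => pvKey path a < pvKey path b) := by
  induction path using List.reverseRecOn with
  | nil => simp [PySem.Set.ofList]
  | append_singleton xs n ih =>
    have hkey : ∀ a, a ∈ xs → pvKey (xs ++ [n]) a = pvKey xs a := by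
      intro a ha
      simp only [pvKey, PySem.List.index?_append_of_mem [n] ha]
    have hmemset : ∀ a, a ∈ PySem.Set.ofList (xs.filter p) → a ∈ xs := by
      intro a ha
      rw [PySem.Set.mem_ofList, List.mem_filter] at ha
      exact ha.1
    have hprev : (PySem.Set.ofList (xs.filter p)).Pairwise
        (fun a b => pvKey (xs ++ [n]) a < pvKey (xs ++ [n]) b) := by
      refine ih.imp_of_mem (fun {a b} ha hb hr => ?_)
      rw [hkey a (hmemset a ha), hkey b (hmemset b hb)]; exact hr
    rw [List.filter_append, List.filter_singleton]
    by_cases hp : p n = true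
    · simp only [hp, cond_true]
      rw [PySem.Set.ofList_eq_foldl, List.foldl_append]
      rw [← PySem.Set.ofList_eq_foldl]
      show (PySem.Set.add (PySem.Set.ofList (xs.filter p)) n).Pairwise _
      by_cases hn : (PySem.Set.ofList (xs.filter p)).contains n = true
      · simp only [PySem.Set.add, hn, if_pos]
        exact hprev
      · simp only [PySem.Set.add, hn, Bool.false_eq_true, if_neg, not_false_iff]
        rw [List.pairwise_append]
        refine ⟨hprev, List.pairwise_singleton _ _, ?_⟩
        intro a ha b hb
        rw [List.mem_singleton] at hb
        have hax : a ∈ xs := hmemset a ha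
        have hnxs : n ∉ xs := by
          intro hmem
          exact absurd (List.contains_iff_mem.mpr
            ((PySem.Set.mem_ofList _ n).mpr (List.mem_filter.mpr ⟨hmem, hp⟩))) (by simpa using hn)
        have hkn : pvKey (xs ++ [n]) n = (xs.length : Int) := by
          rw [pvKey, PySem.List.index?_append_singleton_self xs n hnxs]
          simp
        rw [hb, hkey a hax, hkn]
        exact lt_of_lt_of_le (pvKey_lt_length xs a hax) (by simp)
    · have hp' : p n = false := by simpa using hp
      simp only [hp', cond_false, List.append_nil]
      exact hprev

-- A's position list is the map of the key over the present spine nodes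
lemma posA_eq (path spine : List String) :
    spine.foldl (fun acc s =>
        if path.contains s then acc ++ [(((PySem.List.index? path s).getD 0 : Nat) : Int)] else acc) []
      = (spine.filter (fun s => path.contains s)).map (pvKey path) := by
  have h := PySem.List.foldl_append_if (fun s => path.contains s)
    (fun s => (((PySem.List.index? path s).getD 0 : Nat) : Int)) spine []
  simpa [pvKey] using h

-- B's expected list is the path-present spine nodes
lemma expected_eq (path spine : List String) :
    spine.filter (fun s => (pvFirstOrder (PySem.Set.ofList spine) path).contains s)
      = spine.filter (fun s => path.contains s) := by
  apply List.filter_congr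
  intro s hs
  have h1 : (pvFirstOrder (PySem.Set.ofList spine) path).contains s = true ↔ s ∈ path := by
    rw [List.contains_iff_mem, mem_pvFirstOrder]
    exact ⟨fun h => h.1, fun h => ⟨h, hs⟩⟩
  rw [Bool.eq_iff_iff, h1, List.contains_iff_mem]

lemma eq_sorted_iff (sp : List Int) :
    (sp = PySem.List.sorted sp (fun x => x) false) ↔ sp.Pairwise (· ≤ ·) := by
  constructor
  · intro h
    have hps := PySem.List.sorted_pairwise (xs := sp) (key := fun x : Int => x)
    rw [← h] at hps
    exact hps
  · intro h
    exact (PySem.List.sorted_eq_self_of_pairwise sp (fun x : Int => x) h).symm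

-- per-path core: A's order check holds iff first-appearance order equals spine order
lemma core_iff (path spine : List String) (hN : spine.Nodup) :
    ((spine.filter (fun s => path.contains s)).map (pvKey path)).Pairwise (· ≤ ·)
      ↔ pvFirstOrder (PySem.Set.ofList spine) path = spine.filter (fun s => path.contains s) := by
  set fo := pvFirstOrder (PySem.Set.ofList spine) path with hfo
  set E := spine.filter (fun s => path.contains s) with hE
  have hEmem : ∀ x ∈ E, x ∈ path ∧ x ∈ spine := by
    intro x hx
    rw [hE, List.mem_filter] at hx
    exact ⟨List.contains_iff_mem.mp hx.2, hx.1⟩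
  have hEnodup : E.Nodup := hN.filter _
  have hfonodup : fo.Nodup := by rw [hfo, pvFirstOrder_eq]; exact PySem.Set.nodup_ofList _
  have hperm : E.Perm fo := by
    apply List.perm_of_nodup_nodup_toFinset_eq hEnodup hfonodup
    ext x
    simp only [List.mem_toFinset]
    rw [hfo, mem_pvFirstOrder, hE, List.mem_filter, List.contains_iff_mem]
    tauto
  have hfopw : fo.Pairwise (fun a b => pvKey path a < pvKey path b) := by
    rw [hfo, pvFirstOrder_eq]
    exact pvFO_pairwise _ path
  constructor
  · intro hle
    rw [List.pairwise_map] at hle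
    have hElt : E.Pairwise (fun a b => pvKey path a < pvKey path b) := by
      rcases List.Pairwise.and hle hEnodup with hboth
      refine hboth.imp_of_mem (fun {a b} ha hb hr => ?_)
      rcases hr with ⟨hle', hne⟩
      rcases lt_or_eq_of_le hle' with h | h
      · exact h
      · exact absurd (pvKey_inj path a b (hEmem a ha).1 (hEmem b hb).1 h) hne
    have h1 := PySem.List.sorted_eq_of_perm_of_pairwise_lt fo E (pvKey path) hperm hElt
    have h2 := PySem.List.sorted_eq_of_perm_of_pairwise_lt fo fo (pvKey path) (List.Perm.refl fo) hfopw
    rw [h2] at h1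
    exact h1
  · intro heq
    rw [heq] at hfopw
    rw [List.pairwise_map]
    exact hfopw.imp (fun h => le_of_lt h)

-- per-path bool: A's bool equals B's bool (nodup spine)
lemma bool_eq (path spine : List String) (hN : spine.Nodup) :
    ((spine.foldl (fun acc s =>
        if path.contains s then acc ++ [(((PySem.List.index? path s).getD 0 : Nat) : Int)] else acc) [])
      == PySem.List.sorted (spine.foldl (fun acc s =>
        if path.contains s then acc ++ [(((PySem.List.index? path s).getD 0 : Nat) : Int)] else acc) [])
        (fun x => x) false)
      = (pvFirstOrder (PySem.Set.ofList spine) path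
          == spine.filter (fun s => (pvFirstOrder (PySem.Set.ofList spine) path).contains s)) := by
  rw [posA_eq, expected_eq]
  have hiff : ((spine.filter (fun s => path.contains s)).map (pvKey path)
        = PySem.List.sorted ((spine.filter (fun s => path.contains s)).map (pvKey path)) (fun x => x) false)
      ↔ pvFirstOrder (PySem.Set.ofList spine) path = spine.filter (fun s => path.contains s) := by
    rw [eq_sorted_iff]
    exact core_iff path spine hN
  rw [Bool.eq_iff_iff, beq_iff_eq, beq_iff_eq]
  exact hiff

-- ===== VERDICT (by name: the statement is the Claim_ definition above) =====
theorem check_contractibility_py_spec : Claim_equal_check_contractibility_py := by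
  intro paths spine _ hpre
  show check_contractibility_py paths spine = check_contractibility_py_alt paths spine
  unfold check_contractibility_py check_contractibility_py_alt
  congr 2
  funext contractible q
  simp only []
  rw [bool_eq q.2 spine hpre]
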